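-- pv_equiv track=rewrite | github.com/AI-Lab-Y/DLA_search_and_partition_tree | verify_subspace/fast_find_right_pairs.py | meta_adjust
-- ===== SOURCE A (Python) =====
-- def meta_adjust(px, py, xk, yk, dx, dy, dz):
--     new_arr = [px, py, xk, yk]
--     d_xyz = dx ^ dy ^ dz
--     for i in range(31):
--         t_px, t_py, t_xk, t_yk = new_arr[0], new_arr[1], new_arr[2], new_arr[3]
--         x, y = t_px ^ t_xk, t_py ^ t_yk
--         xi = (x >> i) & 1
--         yi = (y >> i) & 1
--         dxi, dyi, dzi = (dx >> i) & 1, (dy >> i) & 1, (dz >> i) & 1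
--         if dxi == dyi and dxi == dzi:
--             continue
--         if dxi == dyi:
--             tb = ((d_xyz >> (i + 1)) & 1) ^ dxi ^ ((y >> i) & 1)
--             if tb != xi:
--                 new_arr[2] = t_xk ^ (1 << i)
--         else:
--             if i == 0:
--                 ci = 0
--             else:
--                 mask_x = new_arr[0] ^ new_arr[2]
--                 mask_y = new_arr[1] ^ new_arr[3]
--                 ans = (mask_x + mask_y) ^ mask_x ^ mask_y
--                 ci = (ans >> i) & 1
--
--             cp = (d_xyz >> i) & 1
--             if dxi == cp:
--                 tb = ((d_xyz >> (i + 1)) & 1) ^ dxi ^ ci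
--                 if tb != xi:
--                     new_arr[2] = t_xk ^ (1 << i)
--             else:
--                 tb = ((d_xyz >> (i + 1)) & 1) ^ dyi ^ ci
--                 if tb != yi:
--                     new_arr[1] = t_py ^ (1 << i)
--     return new_arr[0], new_arr[1], new_arr[2], new_arr[3]
-- ===== SOURCE B (Python) =====
-- def meta_adjust(px, py, xk, yk, dx, dy, dz):
--     # Same per-bit pass, but: the carry bit ci is maintained as a running
--     # ripple-carry across iterations (instead of being recomputed each round
--     # from (mask_x+mask_y)^mask_x^mask_y), and the branch on dxi==cp is
--     # decided directly from the delta bits (dyi==dzi) without building cp.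
--     p0, p1, p2, p3 = px, py, xk, yk
--     d_xyz = dx ^ dy ^ dz
--     carry = 0
--     for i in range(31):
--         xi = ((p0 ^ p2) >> i) & 1
--         yi = ((p1 ^ p3) >> i) & 1
--         dxi, dyi, dzi = (dx >> i) & 1, (dy >> i) & 1, (dz >> i) & 1
--         hb = (d_xyz >> (i + 1)) & 1
--         if dxi == dyi == dzi:
--             pass
--         elif dxi == dyi:
--             if hb ^ dxi ^ yi != xi:
--                 p2 ^= 1 << i
--         elif dyi == dzi:
--             if hb ^ dxi ^ carry != xi:
--                 p2 ^= 1 << i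
--         else:
--             if hb ^ dyi ^ carry != yi:
--                 p1 ^= 1 << i
--         # fold the (possibly just flipped) bit i of both masks into the carry
--         mxi = ((p0 ^ p2) >> i) & 1
--         myi = ((p1 ^ p3) >> i) & 1
--         carry = (mxi + myi + carry) >> 1
--     return p0, p1, p2, p3
-- ===== Notes on version B (the rewrite author's own statement) =====
-- stated objective: alternative
-- what changed: Instead of recomputing the carry bit each round from the full-width formula (mask_x+mask_y)^mask_x^mask_y, B maintains a single running ripple-carry bit updated as (mx_i+my_i+carry)>>1 after each round, and decides the dxi==cp branch directly from the delta bits (dyi==dzi) without building cp.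
import Mathlib
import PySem

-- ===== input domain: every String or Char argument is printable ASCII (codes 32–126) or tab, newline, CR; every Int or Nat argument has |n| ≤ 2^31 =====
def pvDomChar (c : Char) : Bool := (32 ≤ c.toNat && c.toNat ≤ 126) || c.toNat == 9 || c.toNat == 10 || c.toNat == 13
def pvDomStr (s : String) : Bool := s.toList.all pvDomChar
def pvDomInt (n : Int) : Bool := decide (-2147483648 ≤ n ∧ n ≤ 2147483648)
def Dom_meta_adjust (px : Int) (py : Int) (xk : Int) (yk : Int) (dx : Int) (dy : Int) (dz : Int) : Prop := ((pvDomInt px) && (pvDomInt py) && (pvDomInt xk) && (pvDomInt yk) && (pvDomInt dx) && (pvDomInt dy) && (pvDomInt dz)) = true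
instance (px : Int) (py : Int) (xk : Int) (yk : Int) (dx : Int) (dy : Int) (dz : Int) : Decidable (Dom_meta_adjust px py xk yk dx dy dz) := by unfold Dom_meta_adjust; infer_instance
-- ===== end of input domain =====

-- B keeps A's per-bit pass but maintains the carry bit as a running ripple-carry
-- instead of recomputing it from (mask_x+mask_y)^mask_x^mask_y every iteration
-- (objective: alternative decomposition, same cost).

-- ===== PORT A =====
def metaStepA (dx : Int) (dy : Int) (dz : Int) (dxyz : Int) (s : Int × Int × Int × Int) (i : Nat) : Int × Int × Int × Int :=
  let t_px := s.1; let t_py := s.2.1; let t_xk := s.2.2.1; let t_yk := s.2.2.2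
  let x := PySem.Int.bxor t_px t_xk
  let y := PySem.Int.bxor t_py t_yk
  let xi := PySem.Int.band (x >>> i) 1
  let yi := PySem.Int.band (y >>> i) 1
  let dxi := PySem.Int.band (dx >>> i) 1
  let dyi := PySem.Int.band (dy >>> i) 1
  let dzi := PySem.Int.band (dz >>> i) 1
  if dxi = dyi ∧ dxi = dzi then s
  else if dxi = dyi then
    let tb := PySem.Int.bxor (PySem.Int.bxor (PySem.Int.band (dxyz >>> (i+1)) 1) dxi) (PySem.Int.band (y >>> i) 1)
    if tb ≠ xi then (t_px, t_py, PySem.Int.bxor t_xk ((1:Int) <<< i), t_yk) else s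
  else
    let ci : Int :=
      if i = 0 then 0
      else
        let mask_x := PySem.Int.bxor s.1 s.2.2.1
        let mask_y := PySem.Int.bxor s.2.1 s.2.2.2
        let ans := PySem.Int.bxor (PySem.Int.bxor (mask_x + mask_y) mask_x) mask_y
        PySem.Int.band (ans >>> i) 1
    let cp := PySem.Int.band (dxyz >>> i) 1
    if dxi = cp then
      let tb := PySem.Int.bxor (PySem.Int.bxor (PySem.Int.band (dxyz >>> (i+1)) 1) dxi) ci
      if tb ≠ xi then (t_px, t_py, PySem.Int.bxor t_xk ((1:Int) <<< i), t_yk) else s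
    else
      let tb := PySem.Int.bxor (PySem.Int.bxor (PySem.Int.band (dxyz >>> (i+1)) 1) dyi) ci
      if tb ≠ yi then (t_px, PySem.Int.bxor t_py ((1:Int) <<< i), t_xk, t_yk) else s

def meta_adjust (px : Int) (py : Int) (xk : Int) (yk : Int) (dx : Int) (dy : Int) (dz : Int) : Int × Int × Int × Int :=
  let d_xyz := PySem.Int.bxor (PySem.Int.bxor dx dy) dz
  (List.range 31).foldl (metaStepA dx dy dz d_xyz) (px, py, xk, yk)

-- ===== PORT B =====
def metaStepB (dx : Int) (dy : Int) (dz : Int) (dxyz : Int) (s : (Int × Int × Int × Int) × Int) (i : Nat) : (Int × Int × Int × Int) × Int :=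
  let p := s.1; let carry := s.2
  let xi := PySem.Int.band ((PySem.Int.bxor p.1 p.2.2.1) >>> i) 1
  let yi := PySem.Int.band ((PySem.Int.bxor p.2.1 p.2.2.2) >>> i) 1
  let dxi := PySem.Int.band (dx >>> i) 1
  let dyi := PySem.Int.band (dy >>> i) 1
  let dzi := PySem.Int.band (dz >>> i) 1
  let hb := PySem.Int.band (dxyz >>> (i+1)) 1
  let p' :=
    if dxi = dyi ∧ dyi = dzi then p
    else if dxi = dyi then
      if PySem.Int.bxor (PySem.Int.bxor hb dxi) yi ≠ xi then (p.1, p.2.1, PySem.Int.bxor p.2.2.1 ((1:Int) <<< i), p.2.2.2) else p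
    else if dyi = dzi then
      if PySem.Int.bxor (PySem.Int.bxor hb dxi) carry ≠ xi then (p.1, p.2.1, PySem.Int.bxor p.2.2.1 ((1:Int) <<< i), p.2.2.2) else p
    else
      if PySem.Int.bxor (PySem.Int.bxor hb dyi) carry ≠ yi then (p.1, PySem.Int.bxor p.2.1 ((1:Int) <<< i), p.2.2.1, p.2.2.2) else p
  let mxi := PySem.Int.band ((PySem.Int.bxor p'.1 p'.2.2.1) >>> i) 1
  let myi := PySem.Int.band ((PySem.Int.bxor p'.2.1 p'.2.2.2) >>> i) 1
  (p', (mxi + myi + carry) >>> (1:Nat))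

def meta_adjust_alt (px : Int) (py : Int) (xk : Int) (yk : Int) (dx : Int) (dy : Int) (dz : Int) : Int × Int × Int × Int :=
  let d_xyz := PySem.Int.bxor (PySem.Int.bxor dx dy) dz
  ((List.range 31).foldl (metaStepB dx dy dz d_xyz) ((px, py, xk, yk), 0)).1

-- ===== PRECONDITION & SPEC =====
def Spec_meta_adjust (px : Int) (py : Int) (xk : Int) (yk : Int) (dx : Int) (dy : Int) (dz : Int) (out : Int × Int × Int × Int) : Prop := out = meta_adjust_alt px py xk yk dx dy dz
instance (px : Int) (py : Int) (xk : Int) (yk : Int) (dx : Int) (dy : Int) (dz : Int) (out : Int × Int × Int × Int) : Decidable (Spec_meta_adjust px py xk yk dx dy dz out) := by unfold Spec_meta_adjust; infer_instance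

-- ===== CLAIM (what is proved, stated in full; the proofs are below) =====
def Claim_equal_meta_adjust : Prop := ∀ (px : Int) (py : Int) (xk : Int) (yk : Int) (dx : Int) (dy : Int) (dz : Int), Dom_meta_adjust px py xk yk dx dy dz → Spec_meta_adjust px py xk yk dx dy dz (meta_adjust px py xk yk dx dy dz)

-- ===== LEMMAS AND PROOFS =====

theorem pvShl (n : Nat) : ((1:Int) <<< n) = 2^n := by
  have h : ((1:Int) <<< n) = Int.ofNat (1 <<< n) := rfl
  rw [h, Nat.one_shiftLeft, Int.ofNat_eq_natCast]
  push_cast; ring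

theorem pvSR (x : Int) (n : Nat) : x >>> n = x / 2^n := by
  rw [Int.shiftRight_eq_div_pow]; norm_cast

theorem pvBand1 (x : Int) : PySem.Int.band x 1 = x % 2 := by
  rw [PySem.Int.band_one, PySem.Int.mod_eq_emod_of_pos] ; omega

-- `(x >> i) & 1` is the i-th bit, arithmetically
theorem pvBitDef (x : Int) (i : Nat) : PySem.Int.band (x >>> i) 1 = (x / 2^i) % 2 := by
  rw [pvSR, pvBand1]

theorem pvBxor_mod_two (a b : Int) : PySem.Int.bxor a b % 2 = (a + b) % 2 := by
  have key : ∀ m n : Nat, ((m ^^^ n : Nat) : Int) % 2 = ((m:Int) + n) % 2 := by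
    intro m n
    have h := Nat.xor_mod_two_eq (m := m) (n := n)
    omega
  unfold PySem.Int.bxor
  split_ifs with h1 h2 h3 <;>
    [have := key a.toNat b.toNat; have := key a.toNat (-b-1).toNat;
     have := key (-a-1).toNat b.toNat; have := key (-a-1).toNat (-b-1).toNat] <;> omega

theorem pvBxor_div_two (a b : Int) : PySem.Int.bxor a b / 2 = PySem.Int.bxor (a/2) (b/2) := by
  have key : ∀ m n : Nat, ((m ^^^ n : Nat) : Int) / 2 = ((m/2 ^^^ n/2 : Nat) : Int) := by
    intro m n
    have h := Nat.xor_div_two (a := m) (b := n)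
    omega
  unfold PySem.Int.bxor
  have ha2 : (0 ≤ a/2) ↔ (0 ≤ a) := by constructor <;> intro <;> omega
  have hb2 : (0 ≤ b/2) ↔ (0 ≤ b) := by constructor <;> intro <;> omega
  simp only [ha2, hb2]
  split_ifs with h1 h2
  · have := key a.toNat b.toNat
    have e1 : (a/2).toNat = a.toNat/2 := by omega
    have e2 : (b/2).toNat = b.toNat/2 := by omega
    rw [e1, e2]; omega
  · have := key a.toNat (-b-1).toNat
    have e1 : (a/2).toNat = a.toNat/2 := by omega
    have e2 : (-(b/2)-1).toNat = (-b-1).toNat/2 := by omega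
    rw [e1, e2]; omega
  · have := key (-a-1).toNat b.toNat
    have e1 : (-(a/2)-1).toNat = (-a-1).toNat/2 := by omega
    have e2 : (b/2).toNat = b.toNat/2 := by omega
    rw [e1, e2]; omega
  · have := key (-a-1).toNat (-b-1).toNat
    have e1 : (-(a/2)-1).toNat = (-a-1).toNat/2 := by omega
    have e2 : (-(b/2)-1).toNat = (-b-1).toNat/2 := by omega
    rw [e1, e2]; omega

theorem pvHalfDiv (z : Int) (i : Nat) : z / 2^(i+1) = (z/2)/2^i := by
  rw [Int.ediv_ediv_of_nonneg (by norm_num), ← pow_succ']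

theorem pvBit_bxor (x y : Int) (i : Nat) :
    PySem.Int.bxor x y / 2^i % 2 = (x/2^i % 2 + y/2^i % 2) % 2 := by
  induction i generalizing x y with
  | zero => simpa using pvBxor_mod_two x y
  | succ i ih => rw [pvHalfDiv, pvBxor_div_two, ih, ← pvHalfDiv, ← pvHalfDiv]

theorem pvPeelLow (x : Int) (k : Int) : x % (2*k) = 2*((x/2) % k) + x % 2 := by
  have h1 : x/2/k = x/(2*k) := Int.ediv_ediv_of_nonneg (by norm_num)
  rw [Int.emod_def, Int.emod_def, Int.emod_def, ← h1]; ring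

theorem pvPeelPow (x : Int) (i : Nat) : x % 2^(i+1) = 2*((x/2) % 2^i) + x % 2 := by
  rw [← pvPeelLow, ← pow_succ']

theorem pvPeelHigh (x k : Int) (hk : 0 ≤ k) : x % (2*k) = k*((x/k)%2) + x%k := by
  have h2 : x/(2*k) = x/k/2 := by rw [Int.ediv_ediv_of_nonneg hk, mul_comm]
  rw [Int.emod_def, Int.emod_def, Int.emod_def, h2]; ring

theorem pvPeelHighPow (x : Int) (i : Nat) : x % 2^(i+1) = 2^i*((x/2^i)%2) + x%2^i := by
  rw [← pvPeelHigh x (2^i) (by positivity), ← pow_succ']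

-- the low i bits of an xor depend only on the low i bits of the operands
theorem pvLowXor : ∀ (i : Nat) (a a' b b' : Int), a % 2^i = a' % 2^i → b % 2^i = b' % 2^i →
    PySem.Int.bxor a b % 2^i = PySem.Int.bxor a' b' % 2^i := by
  intro i
  induction i with
  | zero => intro a a' b b' _ _; simp
  | succ i ih =>
      intro a a' b b' ha hb
      simp only [pvPeelPow] at ha hb ⊢
      rw [pvBxor_div_two, pvBxor_div_two, pvBxor_mod_two, pvBxor_mod_two]
      have h1 : (a/2) % 2^i = (a'/2) % 2^i := by omega
      have h2 : (b/2) % 2^i = (b'/2) % 2^i := by omega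
      rw [ih _ _ _ _ h1 h2]
      omega

-- carry into bit i of a + b (with carry-in cin at bit 0), read off A's xor formula
theorem pvCarryChar : ∀ (i : Nat) (a b cin : Int), cin = 0 ∨ cin = 1 →
    PySem.Int.bxor (PySem.Int.bxor (a+b+cin) a) b / 2^i % 2
      = if 2^i ≤ a % 2^i + b % 2^i + cin then 1 else 0 := by
  intro i
  induction i with
  | zero =>
      intro a b cin hc
      simp only [pow_zero, Int.ediv_one, Int.emod_one]
      rcases hc with rfl|rfl <;>
        [(simp only [add_zero]; have h1 := pvBxor_mod_two (PySem.Int.bxor (a+b) a) b;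
          have h2 := pvBxor_mod_two (a+b) a; norm_num; omega);
         (have h1 := pvBxor_mod_two (PySem.Int.bxor (a+b+1) a) b;
          have h2 := pvBxor_mod_two (a+b+1) a; norm_num; omega)]
  | succ i ih =>
      intro a b cin hc
      rw [pvHalfDiv, pvBxor_div_two, pvBxor_div_two]
      have hcin' : (a%2 + b%2 + cin)/2 = 0 ∨ (a%2 + b%2 + cin)/2 = 1 := by omega
      have hsum : (a+b+cin)/2 = a/2 + b/2 + (a%2 + b%2 + cin)/2 := by omega
      rw [hsum]
      rw [ih (a/2) (b/2) _ hcin']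
      have ea := pvPeelPow a i
      have eb := pvPeelPow b i
      have h2 : (0:Int) < 2^i := by positivity
      have hma : 0 ≤ a/2 % 2^i ∧ a/2 % 2^i < 2^i := ⟨Int.emod_nonneg _ (by omega), Int.emod_lt_of_pos _ h2⟩
      have hmb : 0 ≤ b/2 % 2^i ∧ b/2 % 2^i < 2^i := ⟨Int.emod_nonneg _ (by omega), Int.emod_lt_of_pos _ h2⟩
      have hpow : (2:Int)^(i+1) = 2*2^i := by rw [pow_succ']
      split_ifs with g1 g2 g2 <;> omega

-- the carry bit A recomputes each round, as a function of the two masks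
def pvCarry (a b : Int) (i : Nat) : Int :=
  PySem.Int.band (PySem.Int.bxor (PySem.Int.bxor (a+b) a) b >>> i) 1

theorem pvCarry_eq (a b : Int) (i : Nat) :
    pvCarry a b i = if 2^i ≤ a % 2^i + b % 2^i then 1 else 0 := by
  unfold pvCarry
  rw [pvBitDef]
  have h := pvCarryChar i a b 0 (Or.inl rfl)
  simpa using h

theorem pvCarry_zero (a b : Int) : pvCarry a b 0 = 0 := by
  rw [pvCarry_eq]; simp

theorem pvCarry_congr (a a' b b' : Int) (i : Nat)
    (ha : a % 2^i = a' % 2^i) (hb : b % 2^i = b' % 2^i) :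
    pvCarry a b i = pvCarry a' b' i := by
  rw [pvCarry_eq, pvCarry_eq, ha, hb]

-- B's ripple update `(a_i + b_i + carry) >> 1` advances the carry one bit
theorem pvCarry_step (a b : Int) (i : Nat) :
    (PySem.Int.band (a >>> i) 1 + PySem.Int.band (b >>> i) 1 + pvCarry a b i) >>> (1:Nat)
      = pvCarry a b (i+1) := by
  rw [pvBitDef, pvBitDef, pvSR, pvCarry_eq, pvCarry_eq]
  have ea := pvPeelHighPow a i
  have eb := pvPeelHighPow b i
  have h2 : (0:Int) < 2^i := by positivity
  have hra : 0 ≤ a % 2^i ∧ a % 2^i < 2^i := ⟨Int.emod_nonneg _ (by omega), Int.emod_lt_of_pos _ h2⟩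
  have hrb : 0 ≤ b % 2^i ∧ b % 2^i < 2^i := ⟨Int.emod_nonneg _ (by omega), Int.emod_lt_of_pos _ h2⟩
  have hpow : (2:Int)^(i+1) = 2*2^i := by rw [pow_succ']
  have ba : a/2^i%2 = 0 ∨ a/2^i%2 = 1 := by omega
  have bb : b/2^i%2 = 0 ∨ b/2^i%2 = 1 := by omega
  rcases ba with h|h <;> rcases bb with h'|h' <;> rw [h] at ea <;> rw [h'] at eb <;> rw [h, h'] <;>
    split_ifs <;> omega

theorem pvFlip2 (p q : Int) (i : Nat) :
    PySem.Int.bxor p (PySem.Int.bxor q ((1:Int) <<< i)) % 2^i = PySem.Int.bxor p q % 2^i := by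
  apply pvLowXor i p p _ q rfl
  have h := pvLowXor i q q ((1:Int) <<< i) 0 rfl (by rw [pvShl]; simp)
  simpa using h

theorem pvFlip1 (p q : Int) (i : Nat) :
    PySem.Int.bxor (PySem.Int.bxor p ((1:Int) <<< i)) q % 2^i = PySem.Int.bxor p q % 2^i := by
  apply pvLowXor i _ p q q _ rfl
  have h := pvLowXor i p p ((1:Int) <<< i) 0 rfl (by rw [pvShl]; simp)
  simpa using h

theorem pvCarry_update (a a' b b' : Int) (c : Int) (i : Nat)
    (ha : a' % 2^i = a % 2^i) (hb : b' % 2^i = b % 2^i)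
    (hc : c = pvCarry a b i) :
    (PySem.Int.band (a' >>> i) 1 + PySem.Int.band (b' >>> i) 1 + c) >>> (1:Nat) = pvCarry a' b' (i+1) := by
  rw [hc, pvCarry_congr a a' b b' i ha.symm hb.symm, pvCarry_step]

theorem pvBit01 (x : Int) (i : Nat) :
    PySem.Int.band (x >>> i) 1 = 0 ∨ PySem.Int.band (x >>> i) 1 = 1 := by
  rw [pvBitDef]; omega

theorem pvBitW (dx dy dz : Int) (i : Nat) :
    PySem.Int.band (PySem.Int.bxor (PySem.Int.bxor dx dy) dz >>> i) 1
      = ((PySem.Int.band (dx >>> i) 1 + PySem.Int.band (dy >>> i) 1) % 2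
          + PySem.Int.band (dz >>> i) 1) % 2 := by
  rw [pvBitDef, pvBitDef, pvBitDef, pvBitDef, pvBit_bxor, pvBit_bxor]

-- one round: B's step = A's step on the state, and B's carry tracks A's recomputed one
theorem pvStep_eq (dx dy dz : Int) (s : Int × Int × Int × Int) (c : Int) (i : Nat)
    (hc : c = pvCarry (PySem.Int.bxor s.1 s.2.2.1) (PySem.Int.bxor s.2.1 s.2.2.2) i) :
    metaStepB dx dy dz (PySem.Int.bxor (PySem.Int.bxor dx dy) dz) (s, c) i =
      (metaStepA dx dy dz (PySem.Int.bxor (PySem.Int.bxor dx dy) dz) s i,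
       pvCarry (PySem.Int.bxor (metaStepA dx dy dz (PySem.Int.bxor (PySem.Int.bxor dx dy) dz) s i).1
                               (metaStepA dx dy dz (PySem.Int.bxor (PySem.Int.bxor dx dy) dz) s i).2.2.1)
               (PySem.Int.bxor (metaStepA dx dy dz (PySem.Int.bxor (PySem.Int.bxor dx dy) dz) s i).2.1
                               (metaStepA dx dy dz (PySem.Int.bxor (PySem.Int.bxor dx dy) dz) s i).2.2.2) (i+1)) := by
  obtain ⟨p0, p1, p2, p3⟩ := s
  dsimp only at hc
  simp only [metaStepA, metaStepB]
  have hci : (if i = 0 then (0:Int)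
      else PySem.Int.band
        ((PySem.Int.bxor (PySem.Int.bxor (PySem.Int.bxor p0 p2 + PySem.Int.bxor p1 p3) (PySem.Int.bxor p0 p2)) (PySem.Int.bxor p1 p3)) >>> i) 1) = c := by
    rcases i with _|j
    · rw [hc]; simp [pvCarry_zero]
    · rw [hc]; rfl
  rw [hci, pvBitW dx dy dz i]
  rcases pvBit01 dx i with hdx|hdx <;> rcases pvBit01 dy i with hdy|hdy <;> rcases pvBit01 dz i with hdz|hdz <;>
    rw [hdx, hdy, hdz] <;> norm_num <;> (try split_ifs) <;>
    first
      | rfl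
      | exact pvCarry_update _ _ _ _ c i rfl rfl hc
      | exact pvCarry_update _ _ _ _ c i (pvFlip2 p0 p2 i) rfl hc
      | exact pvCarry_update _ _ _ _ c i rfl (pvFlip1 p1 p3 i) hc

theorem pvLoop (dx dy dz : Int) (s0 : Int × Int × Int × Int) (n : Nat) :
    (List.range n).foldl (metaStepB dx dy dz (PySem.Int.bxor (PySem.Int.bxor dx dy) dz)) (s0, 0)
      = ((List.range n).foldl (metaStepA dx dy dz (PySem.Int.bxor (PySem.Int.bxor dx dy) dz)) s0,
         pvCarry
           (PySem.Int.bxor ((List.range n).foldl (metaStepA dx dy dz (PySem.Int.bxor (PySem.Int.bxor dx dy) dz)) s0).1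
                           ((List.range n).foldl (metaStepA dx dy dz (PySem.Int.bxor (PySem.Int.bxor dx dy) dz)) s0).2.2.1)
           (PySem.Int.bxor ((List.range n).foldl (metaStepA dx dy dz (PySem.Int.bxor (PySem.Int.bxor dx dy) dz)) s0).2.1
                           ((List.range n).foldl (metaStepA dx dy dz (PySem.Int.bxor (PySem.Int.bxor dx dy) dz)) s0).2.2.2) n) := by
  induction n with
  | zero => simp [pvCarry_zero]
  | succ n ih =>
      rw [List.range_succ, List.foldl_append, List.foldl_append, ih]
      simp only [List.foldl_cons, List.foldl_nil]
      exact pvStep_eq dx dy dz _ _ n rfl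

-- ===== VERDICT (by name: the statement is the Claim_ definition above) =====
theorem meta_adjust_spec : Claim_equal_meta_adjust := by
  intro px py xk yk dx dy dz _
  unfold Spec_meta_adjust
  show (List.range 31).foldl (metaStepA dx dy dz (PySem.Int.bxor (PySem.Int.bxor dx dy) dz)) (px, py, xk, yk)
      = ((List.range 31).foldl (metaStepB dx dy dz (PySem.Int.bxor (PySem.Int.bxor dx dy) dz)) ((px, py, xk, yk), 0)).1
  rw [pvLoop]
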